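-- pv_equiv track=rewrite | github.com/disparatebits/bootdev-ssg | src/blocks.py | get_heading_level
-- ===== SOURCE A (Python) =====
-- def get_heading_level(block):
--     if not block.startswith('#'):
--         return 0
--     count = 0
--     for char in block:
--         if char == '#':
--             count += 1
--         else:
--             break
--
--     if count < len(block) and block[count] == ' ':
--         return count
--     else:
--         return 0
-- ===== SOURCE B (Python) =====
-- def get_heading_level(block):
--     for i in range(1, len(block)):
--         if block.startswith('#' * i + ' '):
--             return i
--     return 0
-- ===== Notes on version B (the rewrite author's own statement) =====
-- stated objective: alternative
-- what changed: Instead of counting the leading '#' run and then checking the boundary character, B generates each candidate level i and returns the first i for which '#'*i + ' ' is a prefix of the block; no counting pass exists.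
import Mathlib
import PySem

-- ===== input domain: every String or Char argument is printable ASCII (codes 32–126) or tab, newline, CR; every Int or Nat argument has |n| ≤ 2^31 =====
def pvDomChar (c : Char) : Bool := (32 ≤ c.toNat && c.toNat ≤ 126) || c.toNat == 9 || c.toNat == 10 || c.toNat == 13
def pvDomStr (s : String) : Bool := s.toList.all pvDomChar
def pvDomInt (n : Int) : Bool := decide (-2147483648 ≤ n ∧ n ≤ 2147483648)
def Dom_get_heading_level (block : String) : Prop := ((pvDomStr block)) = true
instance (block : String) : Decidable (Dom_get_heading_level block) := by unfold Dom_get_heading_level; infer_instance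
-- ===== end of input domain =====

-- B abandons A's count-the-leading-hash loop: it tries each candidate level i in turn
-- and returns the first i for which '#'*i + ' ' is a prefix of the block (alternative decomposition).

-- ===== PORT A =====
-- the 'for char in block: … break' counting loop, step for step
def pvCountA : List Char → Int
  | [] => 0
  | c :: cs => if c = '#' then 1 + pvCountA cs else 0

def get_heading_level (block : String) : Int :=
  if !(PySem.Str.startswith block "#") then 0
  else
    let count := pvCountA block.toList
    if count < PySem.Str.len block ∧ PySem.Str.pyGet? block count = some ' ' then count else 0

-- ===== PORT B =====
-- 'for i in range(1, len(block)): if block.startswith('#'*i + ' '): return i' as structural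
-- recursion on the remaining range; '#'*i is List.replicate i '#'.
def pvGoB (cs : List Char) (i : Nat) : Int :=
  if i < cs.length then
    (if PySem.Chars.startswith cs (List.replicate i '#' ++ [' ']) then (i : Int) else pvGoB cs (i + 1))
  else 0
termination_by cs.length - i

def get_heading_level_alt (block : String) : Int := pvGoB block.toList 1

-- ===== PRECONDITION & SPEC =====
def Spec_get_heading_level (block : String) (out : Int) : Prop := out = get_heading_level_alt block
instance (block : String) (out : Int) : Decidable (Spec_get_heading_level block out) := by unfold Spec_get_heading_level; infer_instance

-- ===== CLAIM =====
def Claim_equal_get_heading_level : Prop := ∀ (block : String), Dom_get_heading_level block → Spec_get_heading_level block (get_heading_level block)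

-- ===== LEMMAS AND PROOFS =====

-- A's counting loop computes the length of the leading run of '#'
theorem pvCountA_eq_takeWhile (cs : List Char) :
    pvCountA cs = ((cs.takeWhile (· == '#')).length : Int) := by
  induction cs with
  | nil => simp [pvCountA]
  | cons c cs ih =>
    by_cases h : c = '#' <;> simp [pvCountA, h, ih]
    omega

-- block.startswith('#') holds exactly when the leading '#'-run is nonempty
theorem sw_hash_iff (cs : List Char) :
    PySem.Chars.startswith cs ['#'] = true ↔ 1 ≤ (cs.takeWhile (· == '#')).length := by
  rw [PySem.Chars.startswith_iff]
  cases cs with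
  | nil => simp
  | cons c t =>
    constructor
    · rintro ⟨u, hu⟩
      have hc : c = '#' := by
        have := congrArg (·[0]?) hu
        simpa using this.symm
      simp [hc]
    · intro h
      have hc : c = '#' := by
        by_contra hc
        simp [hc] at h
      exact ⟨t, by simp [hc]⟩

-- the pattern '#'*i + ' ' is a prefix exactly when i is the leading-run length and position i is a space
theorem match_iff (cs : List Char) (i : Nat) :
    PySem.Chars.startswith cs (List.replicate i '#' ++ [' ']) = true ↔
      (i = (cs.takeWhile (· == '#')).length ∧ i < cs.length ∧ cs[i]? = some ' ') := by
  rw [PySem.Chars.startswith_iff]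
  constructor
  · rintro ⟨t, ht⟩
    subst ht
    refine ⟨by simp, by simp, ?_⟩
    rw [List.append_assoc, List.getElem?_append_right (by simp)]
    simp
  · rintro ⟨hi, hlen, hget⟩
    have htw : cs.takeWhile (· == '#') = List.replicate i '#' := by
      rw [hi]
      apply List.eq_replicate_of_mem
      intro a ha
      simpa using List.mem_takeWhile_imp ha
    have hsplit := List.takeWhile_append_dropWhile (p := (· == '#')) (l := cs)
    have hget' : (cs.takeWhile (· == '#') ++ cs.dropWhile (· == '#'))[i]? = some ' ' := by
      rw [hsplit]; exact hget
    rw [List.getElem?_append_right (by simp [htw])] at hget'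
    simp [htw] at hget'
    have hdw : cs.dropWhile (· == '#') = ' ' :: (cs.dropWhile (· == '#')).tail := by
      cases hd : cs.dropWhile (· == '#') with
      | nil => rw [hd] at hget'; simp at hget'
      | cons a t => rw [hd] at hget'; simp at hget'; simp [hget']
    refine ⟨(cs.dropWhile (· == '#')).tail, ?_⟩
    conv_rhs => rw [← hsplit, htw, hdw]
    simp

theorem go_zero (cs : List Char) (i : Nat)
    (h : ¬((cs.takeWhile (· == '#')).length < cs.length ∧
           cs[(cs.takeWhile (· == '#')).length]? = some ' ' ∧ i ≤ (cs.takeWhile (· == '#')).length)) :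
    pvGoB cs i = 0 := by
  unfold pvGoB
  split
  · rw [if_neg, go_zero cs (i + 1) (by intro ⟨h1, h2, h3⟩; exact h ⟨h1, h2, by omega⟩)]
    intro hm
    rw [match_iff] at hm
    obtain ⟨h1, h2, h3⟩ := hm
    exact h ⟨h1 ▸ h2, h1 ▸ h3, le_of_eq h1⟩
  · rfl
termination_by cs.length - i

theorem go_yes (cs : List Char) (i : Nat)
    (hi : i ≤ (cs.takeWhile (· == '#')).length)
    (h1 : (cs.takeWhile (· == '#')).length < cs.length)
    (h2 : cs[(cs.takeWhile (· == '#')).length]? = some ' ') :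
    pvGoB cs i = ((cs.takeWhile (· == '#')).length : Int) := by
  unfold pvGoB
  rw [if_pos (by omega)]
  by_cases he : i = (cs.takeWhile (· == '#')).length
  · rw [if_pos (by rw [match_iff]; exact ⟨he, by omega, he ▸ h2⟩), he]
  · rw [if_neg (by intro hm; rw [match_iff] at hm; exact he hm.1),
        go_yes cs (i + 1) (by omega) h1 h2]
termination_by cs.length - i

-- both ports computed as one closed form over the leading-run length
theorem a_closed (block : String) :
    get_heading_level block =
      (if 1 ≤ (block.toList.takeWhile (· == '#')).length ∧
          (block.toList.takeWhile (· == '#')).length < block.toList.length ∧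
          block.toList[(block.toList.takeWhile (· == '#')).length]? = some ' '
       then ((block.toList.takeWhile (· == '#')).length : Int) else 0) := by
  unfold get_heading_level
  simp only [PySem.Str.len_eq, PySem.Str.startswith_eq, PySem.Str.pyGet?_eq,
    PySem.Chars.pyGet?_eq_listPyGet?, pvCountA_eq_takeWhile]
  by_cases hsw : PySem.Chars.startswith block.toList "#".toList = true
  · have h1 := (sw_hash_iff block.toList).mp hsw
    simp only [hsw, Bool.not_true, Bool.false_eq_true, if_false]
    rw [PySem.List.pyGet?_natCast]
    by_cases hc : (block.toList.takeWhile (· == '#')).length < block.toList.length ∧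
        block.toList[(block.toList.takeWhile (· == '#')).length]? = some ' '
    · rw [if_pos ⟨by exact_mod_cast hc.1, hc.2⟩, if_pos ⟨h1, hc⟩]
    · rw [if_neg, if_neg]
      · intro ⟨_, hb⟩; exact hc hb
      · intro ⟨ha, hb⟩; exact hc ⟨by exact_mod_cast ha, hb⟩
  · have h1 := (fun h => hsw ((sw_hash_iff block.toList).mpr h))
    rw [if_pos (by simpa using hsw), if_neg (by intro ⟨ha, _⟩; exact h1 ha)]

theorem b_closed (block : String) :
    get_heading_level_alt block =
      (if 1 ≤ (block.toList.takeWhile (· == '#')).length ∧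
          (block.toList.takeWhile (· == '#')).length < block.toList.length ∧
          block.toList[(block.toList.takeWhile (· == '#')).length]? = some ' '
       then ((block.toList.takeWhile (· == '#')).length : Int) else 0) := by
  unfold get_heading_level_alt
  by_cases hc : 1 ≤ (block.toList.takeWhile (· == '#')).length ∧
      (block.toList.takeWhile (· == '#')).length < block.toList.length ∧
      block.toList[(block.toList.takeWhile (· == '#')).length]? = some ' '
  · rw [if_pos hc, go_yes block.toList 1 hc.1 hc.2.1 hc.2.2]
  · rw [if_neg hc, go_zero block.toList 1 (by intro ⟨ha, hb, hi⟩; exact hc ⟨hi, ha, hb⟩)]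

-- ===== VERDICT =====
theorem get_heading_level_spec : Claim_equal_get_heading_level := by
  intro block _
  unfold Spec_get_heading_level
  rw [a_closed, b_closed]
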